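-- pv_equiv track=rewrite | github.com/DesislavaDimitrova/HackBulgaria | week0/2-Python-harder-problems-set /09.Nth_fib_lists.py | nth_fib_lists
-- ===== SOURCE A (Python) =====
-- def nth_fib_lists(listA, listB, n):
--     i = 2
--     while i <= n:
--         next_list = listA + listB
--         listA = listB
--         listB = next_list
--         i += 1
--     return listA
-- ===== SOURCE B (Python) =====
-- def nth_fib_lists(listA, listB, n):
--     if n <= 1:
--         return listA
--     if n == 2:
--         return listB
--     return nth_fib_lists(listA, listB, n - 2) + nth_fib_lists(listA, listB, n - 1)
-- ===== Notes on version B (the rewrite author's own statement) =====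
-- stated objective: alternative
-- what changed: Replaces the bottom-up iterative accumulation loop with a direct top-down recursion on the Fibonacci recurrence R(n)=R(n-2)+R(n-1), with base cases R(n<=1)=listA, R(2)=listB.
import Mathlib
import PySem

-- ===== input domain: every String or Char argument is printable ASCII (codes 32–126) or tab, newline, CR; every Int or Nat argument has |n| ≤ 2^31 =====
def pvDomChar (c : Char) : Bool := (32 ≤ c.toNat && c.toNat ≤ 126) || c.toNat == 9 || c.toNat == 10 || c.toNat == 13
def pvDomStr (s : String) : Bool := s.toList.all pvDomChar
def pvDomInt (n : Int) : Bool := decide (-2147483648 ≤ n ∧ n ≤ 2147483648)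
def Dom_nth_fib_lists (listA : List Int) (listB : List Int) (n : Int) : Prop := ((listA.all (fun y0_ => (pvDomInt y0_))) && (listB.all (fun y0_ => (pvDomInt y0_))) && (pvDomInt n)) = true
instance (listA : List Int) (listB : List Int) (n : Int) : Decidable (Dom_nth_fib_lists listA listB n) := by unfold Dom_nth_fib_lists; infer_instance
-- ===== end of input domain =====

-- B replaces A's bottom-up iterative accumulation with a direct top-down recursion
-- on the recurrence R(n) = R(n-2) ++ R(n-1); same values, alternative decomposition.

-- ===== PORT A =====
-- the while-loop of A: state (listA, listB, i), runs while i ≤ n, returns listA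
def pvA_loop (listA listB : List Int) (i n : Int) : List Int :=
  if i ≤ n then pvA_loop listB (listA ++ listB) (i + 1) n else listA
termination_by (n + 1 - i).toNat
decreasing_by omega

def nth_fib_lists (listA : List Int) (listB : List Int) (n : Int) : List Int :=
  pvA_loop listA listB 2 n

-- ===== PORT B =====
def nth_fib_lists_alt (listA : List Int) (listB : List Int) (n : Int) : List Int :=
  if n ≤ 1 then listA
  else if n = 2 then listB
  else nth_fib_lists_alt listA listB (n - 2) ++ nth_fib_lists_alt listA listB (n - 1)
termination_by n.toNat
decreasing_by all_goals omega

-- ===== PRECONDITION & SPEC =====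
def Spec_nth_fib_lists (listA : List Int) (listB : List Int) (n : Int) (out : List Int) : Prop := out = nth_fib_lists_alt listA listB n
instance (listA : List Int) (listB : List Int) (n : Int) (out : List Int) : Decidable (Spec_nth_fib_lists listA listB n out) := by unfold Spec_nth_fib_lists; infer_instance

-- ===== CLAIM (what is proved, stated in full; the proofs are below) =====
def Claim_equal_nth_fib_lists : Prop := ∀ (listA : List Int) (listB : List Int) (n : Int), Dom_nth_fib_lists listA listB n → Spec_nth_fib_lists listA listB n (nth_fib_lists listA listB n)

-- ===== LEMMAS AND PROOFS =====

-- shifting the recursion one step: R_{A,B}(m) = R_{B,A++B}(m-1) for m ≥ 2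
theorem alt_shift (k : Nat) : ∀ (A B : List Int) (m : Int), m.toNat ≤ k → 2 ≤ m →
    nth_fib_lists_alt A B m = nth_fib_lists_alt B (A ++ B) (m - 1) := by
  induction k with
  | zero => intro A B m hk hm; omega
  | succ k ih =>
    intro A B m hk hm
    by_cases h2 : m = 2
    · subst h2
      simp [nth_fib_lists_alt]
    · by_cases h3 : m = 3
      · subst h3
        simp [nth_fib_lists_alt]
      · -- m ≥ 4
        have hm4 : 4 ≤ m := by omega
        rw [nth_fib_lists_alt]
        rw [if_neg (by omega), if_neg (by omega)]
        rw [ih A B (m - 2) (by omega) (by omega), ih A B (m - 1) (by omega) (by omega)]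
        conv_rhs => rw [nth_fib_lists_alt]
        rw [if_neg (by omega), if_neg (by omega)]
        have e : m - 2 - 1 = m - 1 - 2 := by ring
        rw [e]

-- the loop from state (A,B,i) computes R_{A,B}(n - i + 2)
theorem loop_eq_alt (k : Nat) : ∀ (A B : List Int) (i n : Int), (n + 1 - i).toNat ≤ k →
    pvA_loop A B i n = nth_fib_lists_alt A B (n - i + 2) := by
  induction k with
  | zero =>
    intro A B i n hk
    have hin : n < i := by omega
    rw [pvA_loop, if_neg (by omega), nth_fib_lists_alt, if_pos (by omega)]
  | succ k ih =>
    intro A B i n hk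
    by_cases h : i ≤ n
    · rw [pvA_loop, if_pos h]
      rw [ih B (A ++ B) (i + 1) n (by omega)]
      have := alt_shift (n - i + 2).toNat A B (n - i + 2) (le_refl _) (by omega)
      rw [this]
      have e : n - (i + 1) + 2 = n - i + 2 - 1 := by ring
      rw [e]
    · rw [pvA_loop, if_neg h, nth_fib_lists_alt, if_pos (by omega)]

-- ===== VERDICT (by name: the statement is the Claim_ definition above) =====
theorem nth_fib_lists_spec : Claim_equal_nth_fib_lists := by
  intro listA listB n _
  unfold Spec_nth_fib_lists nth_fib_lists
  rw [loop_eq_alt (n + 1 - 2).toNat listA listB 2 n (le_refl _)]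
  norm_num
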